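-- pv_equiv track=rewrite | github.com/light-le/AdventOfCode | 2023/day15.py | hash_algo
-- ===== SOURCE A (Python) =====
-- def hash_algo(step: str) -> int:
--     current_value = 0
--     for char in step:
--         ascii_value = ord(char)
--         current_value += ascii_value
--         current_value *= 17
--         current_value %= 256
--     return current_value
-- ===== SOURCE B (Python) =====
-- def hash_algo(step: str) -> int:
--     # The hash is linear mod 256: result = sum(ord(c_i) * 17^(n-i)) mod 256.
--     # Compute that closed-form weighted sum directly with modular exponentiation
--     # instead of threading a running value through the characters.
--     n = len(step)
--     return sum(ord(c) * pow(17, n - i, 256) for i, c in enumerate(step)) % 256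
-- ===== Notes on version B (the rewrite author's own statement) =====
-- stated objective: alternative
-- what changed: Replaced the sequential recurrence ((acc+ord)*17 mod 256 per character) by the closed-form linear combination sum(ord(c_i)*17^(n-i), mod 256) computed independently per character with modular exponentiation, exploiting that the hash is a linear function mod 256.
import Mathlib
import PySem

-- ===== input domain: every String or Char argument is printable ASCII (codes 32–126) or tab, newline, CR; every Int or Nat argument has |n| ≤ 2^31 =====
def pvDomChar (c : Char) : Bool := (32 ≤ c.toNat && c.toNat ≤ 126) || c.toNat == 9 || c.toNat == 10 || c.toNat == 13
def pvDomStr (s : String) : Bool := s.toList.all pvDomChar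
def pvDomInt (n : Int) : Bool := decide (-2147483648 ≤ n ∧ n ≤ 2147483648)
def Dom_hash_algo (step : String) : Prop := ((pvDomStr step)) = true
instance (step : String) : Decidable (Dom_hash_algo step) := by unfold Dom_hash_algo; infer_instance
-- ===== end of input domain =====

-- B replaces A's per-character recurrence by the closed-form linear combination
-- sum(ord(c_i) * 17^(n-i)) mod 256 (the hash is linear mod 256): alternative algorithm.

-- ===== PORT A =====
-- A's for-loop transliterated as structural recursion on the characters, threading current_value
def hashLoopA (cv : Int) : List Char → Int
  | [] => cv
  | c :: rest =>
    let ascii_value : Int := c.toNat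
    let cv1 := cv + ascii_value
    let cv2 := cv1 * 17
    let cv3 := PySem.Int.mod cv2 256
    hashLoopA cv3 rest

def hash_algo (step : String) : Int := hashLoopA 0 step.toList

-- ===== PORT B =====
-- sum(ord(c) * pow(17, n - i, 256) for i, c in enumerate(step)) % 256
-- pow(17, n - i, 256) is PySem.Int.powMod; its Nat exponent (n - p.1).toNat is exact here
-- because for every enumerate index i we have i < n, so n - i ≥ 1.
def hash_algo_alt (step : String) : Int :=
  let n : Int := PySem.Str.len step
  PySem.Int.mod
    (((PySem.List.enumerate step.toList).map
        (fun p => (p.2.toNat : Int) * PySem.Int.powMod 17 (n - p.1).toNat 256)).sum)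
    256

-- ===== PRECONDITION & SPEC =====
def Spec_hash_algo (step : String) (out : Int) : Prop := out = hash_algo_alt step
instance (step : String) (out : Int) : Decidable (Spec_hash_algo step out) := by unfold Spec_hash_algo; infer_instance

-- ===== CLAIM (what is proved, stated in full; the proofs are below) =====
def Claim_equal_hash_algo : Prop := ∀ (step : String), Dom_hash_algo step → Spec_hash_algo step (hash_algo step)

-- ===== LEMMAS AND PROOFS =====

-- weighted sum sum(ord(c_i) * 17^(len-i)) over a character list, by recursion
def pvW : List Char → Int
  | [] => 0
  | c :: rest => (c.toNat : Int) * 17 ^ (rest.length + 1) + pvW rest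

-- a factor already reduced mod 256 can be un-reduced under an outer mod 256
theorem pv_mod_absorb (a p w : Int) : (a % 256 * p + w) % 256 = (a * p + w) % 256 := by
  conv_lhs => rw [Int.add_emod, Int.mul_emod, Int.emod_emod_of_dvd _ dvd_rfl]
  rw [← Int.mul_emod, ← Int.add_emod]

theorem hashLoopA_closed (l : List Char) : ∀ cv : Int, 0 ≤ cv → cv < 256 →
    hashLoopA cv l = (cv * 17 ^ l.length + pvW l) % 256 := by
  induction l with
  | nil =>
    intro cv h0 h1
    simp [hashLoopA, pvW, Int.emod_eq_of_lt h0 h1]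
  | cons c rest ih =>
    intro cv h0 h1
    have hmod : PySem.Int.mod ((cv + (c.toNat : Int)) * 17) 256
        = ((cv + (c.toNat : Int)) * 17) % 256 :=
      PySem.Int.mod_eq_emod_of_pos (by norm_num)
    have h0' : 0 ≤ ((cv + (c.toNat : Int)) * 17) % 256 := Int.emod_nonneg _ (by norm_num)
    have h1' : ((cv + (c.toNat : Int)) * 17) % 256 < 256 := Int.emod_lt_of_pos _ (by norm_num)
    show hashLoopA (PySem.Int.mod ((cv + (c.toNat : Int)) * 17) 256) rest = _
    rw [hmod, ih _ h0' h1', pv_mod_absorb]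
    congr 1
    simp [pvW, List.length_cons]
    ring

theorem pv_sum_enum (l : List Char) : ∀ (k n : Int), n = k + l.length →
    (((PySem.List.enumerate l k).map
        (fun p => (p.2.toNat : Int) * ((17 ^ (n - p.1).toNat) % 256))).sum) % 256
      = pvW l % 256 := by
  induction l with
  | nil => intro k n _; simp [PySem.List.enumerate_nil, pvW]
  | cons c rest ih =>
    intro k n hn
    have he : (n - k).toNat = rest.length + 1 := by
      simp [List.length_cons] at hn; omega
    have ih' := ih (k + 1) n (by simp [List.length_cons] at hn ⊢; omega)
    rw [PySem.List.enumerate_cons]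
    simp only [List.map_cons, List.sum_cons, he]
    rw [Int.add_emod, Int.mul_emod, Int.emod_emod_of_dvd _ dvd_rfl, ih',
      ← Int.mul_emod, ← Int.add_emod]
    rfl

-- ===== VERDICT (by name: the statement is the Claim_ definition above) =====
theorem hash_algo_spec : Claim_equal_hash_algo := by
  intro step _
  unfold Spec_hash_algo hash_algo hash_algo_alt
  rw [hashLoopA_closed step.toList 0 le_rfl (by norm_num)]
  have hlen : PySem.Str.len step = (step.toList.length : Int) := by simp [pysem]
  simp only [hlen, zero_mul, zero_add]
  have hmod : ∀ x : Int, PySem.Int.mod x 256 = x % 256 := fun x =>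
    PySem.Int.mod_eq_emod_of_pos (by norm_num)
  simp only [PySem.Int.powMod, hmod]
  exact (pv_sum_enum step.toList 0 (step.toList.length) (by simp)).symm
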